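-- pv_equiv track=rewrite | github.com/yfyourfriend/CAY-algorithm | util/image_generation.py | big_M
-- ===== SOURCE A (Python) =====
-- def big_M(input_mat):
--     """
--     Assume 3 alphabets; -1,0,1 as input from a list of list matrix
--     Each alphabet is defined to have a k x k shape, where k=5 in this case
--     Returns 5 times bigger matrix.
--     """
--     lenmat = len(input_mat)
--     # define 5 times bigger matrix
--     output_mat = [[0 for i in range(5*lenmat)] for j in range(5*lenmat)]
--     # define shape for 0
--     shape_zero = [[1 for i in range(5)] for j in range(5)]
--     shape_zero[2][2]=0
--     shape_zero[2][3]=0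
--     shape_zero[2][4]=0
--     shape_zero[3][2]=0
--     shape_zero[3][4]=0
--     shape_zero[4][2]=0
--     shape_zero[4][3]=0
--     shape_zero[4][4]=0
--
--     # define shape for 1
--     shape_one = [[1 for i in range(5)] for j in range(5)]
--     shape_one[2][3] = 0
--     shape_one[3][3] = 0
--     shape_one[4][3] = 0
--     shape_one[3][4] = 0
--     shape_one[3][2] = 0
--
--     # define shape for -1
--     shape_min = [[1 for i in range(5)] for j in range(5)]
--     shape_min[3][3] = 0
--     shape_min[2][2] = 0
--     shape_min[4][4] = 0
--     shape_min[2][4] = 0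
--
--     for i in range(lenmat):
--         for j in range(lenmat):
--             # where i,j correspond to row, col of mat
--             # Produce 5 x 5 for each entry
--
--             # Case 1 : entry is 0
--             if input_mat[i][j] == 0:
--                 for k in range(5):
--                     for l in range(5):
--                         output_mat[5*i+k][5*j+l] = shape_zero[k][l]
--             # Case 2 : entry is 1
--             if input_mat[i][j] == 1:
--                 for k in range(5):
--                     for l in range(5):
--                         output_mat[5*i+k][5*j+l] = shape_one[k][l]
--             # Case 3 : entry is -1
--             if input_mat[i][j] == -1:
--                 for k in range(5):
--                     for l in range(5):
--                         output_mat[5*i+k][5*j+l] = shape_min[k][l]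
--     return output_mat
-- ===== SOURCE B (Python) =====
-- def _cell(v, k, l):
--     # closed-form pixel value of the 5x5 glyph for entry v at glyph position (k, l)
--     if v == 0:
--         return 0 if (k >= 2 and l >= 2 and (k, l) != (3, 3)) else 1
--     if v == 1:
--         return 0 if abs(k - 3) + abs(l - 3) <= 1 else 1
--     if v == -1:
--         return 0 if (k >= 2 and (k == l or (k, l) == (2, 4))) else 1
--     return 0
--
--
-- def big_M(input_mat):
--     n = len(input_mat)
--     return [[_cell(input_mat[r // 5][c // 5], r % 5, c % 5)
--              for c in range(5 * n)] for r in range(5 * n)]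
-- ===== Notes on version B (the rewrite author's own statement) =====
-- stated objective: alternative
-- what changed: Instead of preallocating a 5n x 5n zero grid and scattering hand-built glyph tables into it with four nested loops guarded by an if-chain, B has no glyph tables or block writes at all: each output pixel (r,c) is computed independently by a closed-form arithmetic predicate on the entry input_mat[r//5][c//5] and the glyph coordinates (r%5, c%5).
import Mathlib
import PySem

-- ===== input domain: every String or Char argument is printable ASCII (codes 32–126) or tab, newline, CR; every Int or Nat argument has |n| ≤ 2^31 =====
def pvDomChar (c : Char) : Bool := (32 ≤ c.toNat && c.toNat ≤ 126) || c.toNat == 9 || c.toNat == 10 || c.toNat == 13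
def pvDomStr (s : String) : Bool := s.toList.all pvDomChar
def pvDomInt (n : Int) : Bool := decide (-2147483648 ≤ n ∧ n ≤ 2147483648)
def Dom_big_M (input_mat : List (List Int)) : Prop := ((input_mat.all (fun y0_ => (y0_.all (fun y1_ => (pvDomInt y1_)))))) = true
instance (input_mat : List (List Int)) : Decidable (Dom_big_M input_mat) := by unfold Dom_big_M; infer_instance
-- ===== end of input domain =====

-- B replaces A's preallocated 5n×5n grid, glyph tables and if-chain of nested scatter-writes
-- by a closed-form per-pixel formula: each output cell (r,c) is computed directly from the
-- entry input_mat[r//5][c//5] and the glyph coordinates (r%5, c%5); objective: alternative.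

-- ===== PORT A =====
-- output_mat[r][c] = v  (Python list-of-list element assignment)
def pvSet2 (m : List (List Int)) (r c : Nat) (v : Int) : List (List Int) :=
  m.set r ((m.getD r []).set c v)

-- [[1 for i in range(5)] for j in range(5)]
def pvOnes5 : List (List Int) := List.replicate 5 (List.replicate 5 (1 : Int))

def shape_zero : List (List Int) :=
  pvSet2 (pvSet2 (pvSet2 (pvSet2 (pvSet2 (pvSet2 (pvSet2 (pvSet2 pvOnes5 2 2 0) 2 3 0) 2 4 0) 3 2 0) 3 4 0) 4 2 0) 4 3 0) 4 4 0

def shape_one : List (List Int) :=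
  pvSet2 (pvSet2 (pvSet2 (pvSet2 (pvSet2 pvOnes5 2 3 0) 3 3 0) 4 3 0) 3 4 0) 3 2 0

def shape_min : List (List Int) :=
  pvSet2 (pvSet2 (pvSet2 (pvSet2 pvOnes5 3 3 0) 2 2 0) 4 4 0) 2 4 0

-- the k/l double loop writing shape sh into the block at (5*i, 5*j)
def pvFill (sh : List (List Int)) (i j : Nat) (om : List (List Int)) : List (List Int) :=
  (List.range 5).foldl (fun om k =>
    (List.range 5).foldl (fun om l =>
      pvSet2 om (5*i+k) (5*j+l) ((sh.getD k []).getD l 0)) om) om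

-- the body of A's j-loop (three sequential ifs); input_mat[i][j] is read with getD:
-- the default 2 is only reached where Python raises IndexError, i.e. outside Pre_
def pvCell (input_mat : List (List Int)) (i : Nat) (om : List (List Int)) (j : Nat) : List (List Int) :=
  let v := (input_mat.getD i []).getD j 2
  let om := if v = 0 then pvFill shape_zero i j om else om
  let om := if v = 1 then pvFill shape_one i j om else om
  let om := if v = -1 then pvFill shape_min i j om else om
  om

def big_M (input_mat : List (List Int)) : List (List Int) :=
  let lenmat := input_mat.length
  let output_mat := List.replicate (5*lenmat) (List.replicate (5*lenmat) (0 : Int))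
  (List.range lenmat).foldl (fun om i =>
    (List.range lenmat).foldl (pvCell input_mat i) om) output_mat

-- ===== PORT B =====
-- B's _cell: closed-form pixel value of the glyph for entry v at position (k, l)
def pvCellB (v k l : Int) : Int :=
  if v = 0 then (if 2 ≤ k ∧ 2 ≤ l ∧ ¬(k = 3 ∧ l = 3) then 0 else 1)
  else if v = 1 then (if |k - 3| + |l - 3| ≤ 1 then 0 else 1)
  else if v = -1 then (if 2 ≤ k ∧ (k = l ∨ (k = 2 ∧ l = 4)) then 0 else 1)
  else 0

-- input_mat[r//5][c//5] is read with getD; the default 2 is only reached where Python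
-- raises IndexError, i.e. outside Pre_
def big_M_alt (input_mat : List (List Int)) : List (List Int) :=
  let n := input_mat.length
  (List.range (5*n)).map (fun r =>
    (List.range (5*n)).map (fun c =>
      pvCellB ((input_mat.getD (r/5) []).getD (c/5) 2) ((r % 5 : Nat) : Int) ((c % 5 : Nat) : Int)))

-- ===== PRECONDITION & SPEC =====
-- Pre_ excludes exactly the inputs where A raises IndexError: some row shorter than
-- len(input_mat) (A indexes every row at columns 0..len(input_mat)-1).
def Pre_big_M (input_mat : List (List Int)) : Prop :=
  ∀ row ∈ input_mat, input_mat.length ≤ row.length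
instance (input_mat : List (List Int)) : Decidable (Pre_big_M input_mat) := by unfold Pre_big_M; infer_instance

def pvWitness_big_M : List (List Int) := [[0, 1], [-1, 2]]

def Spec_big_M (input_mat : List (List Int)) (out : List (List Int)) : Prop := out = big_M_alt input_mat
instance (input_mat : List (List Int)) (out : List (List Int)) : Decidable (Spec_big_M input_mat out) := by unfold Spec_big_M; infer_instance

-- ===== CLAIM (what is proved, stated in full; the proofs are below) =====
def Claim_equal_big_M : Prop := ∀ (input_mat : List (List Int)), Dom_big_M input_mat → Pre_big_M input_mat → Spec_big_M input_mat (big_M input_mat)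

-- ===== LEMMAS AND PROOFS =====

-- list-surgery lemmas
theorem pv_set_append_len {α : Type} (p z : List α) (n : Nat) (a : α) :
    (p ++ z).set (p.length + n) a = p ++ z.set n a := by
  induction p with
  | nil => simp
  | cons x tl ih => simp [Nat.succ_add, ih]

theorem pv_getD_append_len {α : Type} (p z : List α) (n : Nat) (d : α) :
    (p ++ z).getD (p.length + n) d = z.getD n d := by
  induction p with
  | nil => simp
  | cons x tl ih => simp [List.getD, Nat.succ_add] at ih ⊢; exact ih

theorem pv_getD_set_self {α : Type} (l : List α) (i : Nat) (a d : α) (h : i < l.length) :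
    (l.set i a).getD i d = a := by
  simp [List.getD, h]

theorem pv_mid_set0 {α : Type} (x0 x1 x2 x3 x4 v : α) (r : List α) :
    (x0::x1::x2::x3::x4::r).set 0 v = v::x1::x2::x3::x4::r := rfl
theorem pv_mid_set1 {α : Type} (x0 x1 x2 x3 x4 v : α) (r : List α) :
    (x0::x1::x2::x3::x4::r).set 1 v = x0::v::x2::x3::x4::r := rfl
theorem pv_mid_set2 {α : Type} (x0 x1 x2 x3 x4 v : α) (r : List α) :
    (x0::x1::x2::x3::x4::r).set 2 v = x0::x1::v::x3::x4::r := rfl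
theorem pv_mid_set3 {α : Type} (x0 x1 x2 x3 x4 v : α) (r : List α) :
    (x0::x1::x2::x3::x4::r).set 3 v = x0::x1::x2::v::x4::r := rfl
theorem pv_mid_set4 {α : Type} (x0 x1 x2 x3 x4 v : α) (r : List α) :
    (x0::x1::x2::x3::x4::r).set 4 v = x0::x1::x2::x3::v::r := rfl

-- writing the five cells 5j..5j+4 of a row p ++ 0⁵ ++ t, |p| = 5j
theorem pv_writeRow5 (p t : List Int) (c0 c1 c2 c3 c4 : Int) (j : Nat) (hp : p.length = 5*j) :
    ((((((p ++ 0::0::0::0::0::t).set (5*j+0) c0).set (5*j+1) c1).set (5*j+2) c2).set (5*j+3) c3).set (5*j+4) c4)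
      = p ++ c0::c1::c2::c3::c4::t := by
  rw [← hp, pv_set_append_len, pv_set_append_len, pv_set_append_len, pv_set_append_len,
      pv_set_append_len]
  rfl

def pvRow5 (s t : List Int) : List Int :=
  s.getD 0 0 :: s.getD 1 0 :: s.getD 2 0 :: s.getD 3 0 :: s.getD 4 0 :: t

-- the inner l-loop writes one glyph row into row r of the grid
theorem pv_rowCellWrite (s : List Int) (j r : Nat) (p t : List Int) {om : List (List Int)}
    (hr : r < om.length) (hrow : om.getD r [] = p ++ 0::0::0::0::0::t) (hp : p.length = 5*j) :
    pvSet2 (pvSet2 (pvSet2 (pvSet2 (pvSet2 om r (5*j+0) (s.getD 0 0)) r (5*j+1) (s.getD 1 0))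
        r (5*j+2) (s.getD 2 0)) r (5*j+3) (s.getD 3 0)) r (5*j+4) (s.getD 4 0)
      = om.set r (p ++ pvRow5 s t) := by
  simp only [pvSet2]
  rw [hrow]
  simp only [pv_getD_set_self _ r _ _ (by simpa using hr), List.set_set]
  rw [pv_writeRow5 p t _ _ _ _ _ j hp]
  rfl

set_option maxHeartbeats 1000000 in
theorem pv_cellWrite (S : List (List Int)) (i j : Nat) (done rest : List (List Int))
    (p0 p1 p2 p3 p4 t0 t1 t2 t3 t4 : List Int)
    (hd : done.length = 5*i) (h0 : p0.length = 5*j) (h1 : p1.length = 5*j) (h2 : p2.length = 5*j)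
    (h3 : p3.length = 5*j) (h4 : p4.length = 5*j) :
    pvFill S i j (done ++ (p0 ++ 0::0::0::0::0::t0) :: (p1 ++ 0::0::0::0::0::t1) ::
        (p2 ++ 0::0::0::0::0::t2) :: (p3 ++ 0::0::0::0::0::t3) :: (p4 ++ 0::0::0::0::0::t4) :: rest)
      = done ++ (p0 ++ pvRow5 (S.getD 0 []) t0) :: (p1 ++ pvRow5 (S.getD 1 []) t1) ::
        (p2 ++ pvRow5 (S.getD 2 []) t2) :: (p3 ++ pvRow5 (S.getD 3 []) t3) ::
        (p4 ++ pvRow5 (S.getD 4 []) t4) :: rest := by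
  unfold pvFill
  rw [show List.range 5 = [0,1,2,3,4] from rfl]
  simp only [List.foldl_cons, List.foldl_nil]
  rw [← hd]
  rw [pv_rowCellWrite (S.getD 0 []) j (done.length+0) p0 t0]
  rw [pv_set_append_len]
  simp only [pv_mid_set0, pv_mid_set1, pv_mid_set2, pv_mid_set3, pv_mid_set4]
  rw [pv_rowCellWrite (S.getD 1 []) j (done.length+1) p1 t1]
  rw [pv_set_append_len]
  simp only [pv_mid_set0, pv_mid_set1, pv_mid_set2, pv_mid_set3, pv_mid_set4]
  rw [pv_rowCellWrite (S.getD 2 []) j (done.length+2) p2 t2]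
  rw [pv_set_append_len]
  simp only [pv_mid_set0, pv_mid_set1, pv_mid_set2, pv_mid_set3, pv_mid_set4]
  rw [pv_rowCellWrite (S.getD 3 []) j (done.length+3) p3 t3]
  rw [pv_set_append_len]
  simp only [pv_mid_set0, pv_mid_set1, pv_mid_set2, pv_mid_set3, pv_mid_set4]
  rw [pv_rowCellWrite (S.getD 4 []) j (done.length+4) p4 t4]
  rw [pv_set_append_len]
  simp only [pv_mid_set0, pv_mid_set1, pv_mid_set2, pv_mid_set3, pv_mid_set4]
  all_goals first
    | exact h0 | exact h1 | exact h2 | exact h3 | exact h4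
    | (rw [pv_getD_append_len]; rfl)
    | (simp [List.length_append])

-- proof-side vocabulary: glyph tables (used only to factor the equivalence proof)
def pvZeroBlock : List (List Int) := List.replicate 5 [0, 0, 0, 0, 0]

def pvG0 : List (List Int) :=
  [[1,1,1,1,1],[1,1,1,1,1],[1,1,0,0,0],[1,1,0,1,0],[1,1,0,0,0]]
def pvG1 : List (List Int) :=
  [[1,1,1,1,1],[1,1,1,1,1],[1,1,1,0,1],[1,1,0,0,0],[1,1,1,0,1]]
def pvGm : List (List Int) :=
  [[1,1,1,1,1],[1,1,1,1,1],[1,1,0,1,0],[1,1,1,0,1],[1,1,1,1,0]]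

def pvGlyph (v : Int) : List (List Int) :=
  if v = 0 then pvG0 else if v = 1 then pvG1 else if v = -1 then pvGm else pvZeroBlock

def pvChunk (row : List Int) (k j : Nat) : List Int :=
  (pvGlyph (row.getD j 2)).getD k []

def pvRowP (row : List Int) (k m : Nat) : List Int :=
  (List.range m).foldl (fun r j => r ++ pvChunk row k j) []

def pvRowB (row : List Int) (n m k : Nat) : List Int :=
  pvRowP row k m ++ List.replicate (5*(n-m)) 0

theorem pvRowP_succ (row : List Int) (k m : Nat) :
    pvRowP row k (m+1) = pvRowP row k m ++ pvChunk row k m := by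
  simp [pvRowP, List.range_succ]

theorem pvChunk_len (row : List Int) (k j : Nat) (hk : k < 5) :
    (pvChunk row k j).length = 5 := by
  unfold pvChunk pvGlyph
  split_ifs <;> interval_cases k <;> rfl

theorem pvRowP_len (row : List Int) (k m : Nat) (hk : k < 5) :
    (pvRowP row k m).length = 5*m := by
  induction m with
  | zero => simp [pvRowP]
  | succ m ih => rw [pvRowP_succ]; simp [ih, pvChunk_len row k m hk]; ring

theorem pv_repl_split {α : Type} (m n : Nat) (x : α) (h : m < n) :
    List.replicate (5*(n-m)) x = x::x::x::x::x::List.replicate (5*(n-(m+1))) x := by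
  rw [show 5*(n-m) = 5 + 5*(n-(m+1)) by omega, List.replicate_add]
  rfl

-- one step of A's j-loop preserves the row-prefix invariant
theorem pv_colStep (input_mat : List (List Int)) (i m n : Nat) (done rest : List (List Int))
    (hd : done.length = 5*i) (hm : m < n) :
    pvCell input_mat i (done ++ (pvRowB (input_mat.getD i []) n m 0) :: (pvRowB (input_mat.getD i []) n m 1) ::
        (pvRowB (input_mat.getD i []) n m 2) :: (pvRowB (input_mat.getD i []) n m 3) ::
        (pvRowB (input_mat.getD i []) n m 4) :: rest) m
      = done ++ (pvRowB (input_mat.getD i []) n (m+1) 0) :: (pvRowB (input_mat.getD i []) n (m+1) 1) ::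
        (pvRowB (input_mat.getD i []) n (m+1) 2) :: (pvRowB (input_mat.getD i []) n (m+1) 3) ::
        (pvRowB (input_mat.getD i []) n (m+1) 4) :: rest := by
  unfold pvCell
  simp only [pvRowB, pv_repl_split m n (0:Int) hm]
  by_cases h0 : (input_mat.getD i []).getD m 2 = 0
  · have ne1 : ¬((input_mat.getD i []).getD m 2 = 1) := by rw [h0]; norm_num
    have nem : ¬((input_mat.getD i []).getD m 2 = -1) := by rw [h0]; norm_num
    rw [if_pos h0, if_neg ne1, if_neg nem]
    rw [pv_cellWrite shape_zero i m done rest _ _ _ _ _ _ _ _ _ _ hd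
        (pvRowP_len _ 0 m (by omega)) (pvRowP_len _ 1 m (by omega)) (pvRowP_len _ 2 m (by omega))
        (pvRowP_len _ 3 m (by omega)) (pvRowP_len _ 4 m (by omega))]
    simp only [pvRowP_succ, pvChunk, h0, pvGlyph, List.append_assoc]
    norm_num
    exact ⟨rfl, rfl, rfl, rfl, rfl⟩
  · by_cases h1 : (input_mat.getD i []).getD m 2 = 1
    · have ne0 : ¬((input_mat.getD i []).getD m 2 = 0) := by rw [h1]; norm_num
      have nem : ¬((input_mat.getD i []).getD m 2 = -1) := by rw [h1]; norm_num
      rw [if_neg ne0, if_pos h1, if_neg nem]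
      rw [pv_cellWrite shape_one i m done rest _ _ _ _ _ _ _ _ _ _ hd
          (pvRowP_len _ 0 m (by omega)) (pvRowP_len _ 1 m (by omega)) (pvRowP_len _ 2 m (by omega))
          (pvRowP_len _ 3 m (by omega)) (pvRowP_len _ 4 m (by omega))]
      simp only [pvRowP_succ, pvChunk, h1, pvGlyph, List.append_assoc]
      norm_num
      exact ⟨rfl, rfl, rfl, rfl, rfl⟩
    · by_cases hm1 : (input_mat.getD i []).getD m 2 = -1
      · rw [if_neg h0, if_neg h1, if_pos hm1]
        rw [pv_cellWrite shape_min i m done rest _ _ _ _ _ _ _ _ _ _ hd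
            (pvRowP_len _ 0 m (by omega)) (pvRowP_len _ 1 m (by omega)) (pvRowP_len _ 2 m (by omega))
            (pvRowP_len _ 3 m (by omega)) (pvRowP_len _ 4 m (by omega))]
        simp only [pvRowP_succ, pvChunk, hm1, pvGlyph, List.append_assoc]
        norm_num
        exact ⟨rfl, rfl, rfl, rfl, rfl⟩
      · rw [if_neg h0, if_neg h1, if_neg hm1]
        simp only [pvRowP_succ, pvChunk, pvGlyph, if_neg h0, if_neg h1, if_neg hm1,
          List.append_assoc]
        rfl

-- A's whole j-loop
theorem pv_colLoop (input_mat : List (List Int)) (i n : Nat) (done rest : List (List Int))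
    (hd : done.length = 5*i) (m : Nat) (hmn : m ≤ n) :
    (List.range m).foldl (pvCell input_mat i)
        (done ++ (pvRowB (input_mat.getD i []) n 0 0) :: (pvRowB (input_mat.getD i []) n 0 1) ::
          (pvRowB (input_mat.getD i []) n 0 2) :: (pvRowB (input_mat.getD i []) n 0 3) ::
          (pvRowB (input_mat.getD i []) n 0 4) :: rest)
      = done ++ (pvRowB (input_mat.getD i []) n m 0) :: (pvRowB (input_mat.getD i []) n m 1) ::
          (pvRowB (input_mat.getD i []) n m 2) :: (pvRowB (input_mat.getD i []) n m 3) ::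
          (pvRowB (input_mat.getD i []) n m 4) :: rest := by
  induction m with
  | zero => rfl
  | succ m ih =>
      rw [List.range_succ, List.foldl_append, ih (by omega), List.foldl_cons, List.foldl_nil,
          pv_colStep input_mat i m n done rest hd (by omega)]

-- the five glyph rows for one input row (as produced by A's writes)
def pvBRows (row : List Int) (n : Nat) : List (List Int) :=
  [pvRowP row 0 n, pvRowP row 1 n, pvRowP row 2 n, pvRowP row 3 n, pvRowP row 4 n]

def pvBOut (input_mat : List (List Int)) (n i : Nat) : List (List Int) :=
  (List.range i).foldl (fun out ii => out ++ pvBRows (input_mat.getD ii []) n) []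

theorem pvBOut_succ (input_mat : List (List Int)) (n i : Nat) :
    pvBOut input_mat n (i+1) = pvBOut input_mat n i ++ pvBRows (input_mat.getD i []) n := by
  simp [pvBOut, List.range_succ]

theorem pvBOut_len (input_mat : List (List Int)) (n i : Nat) :
    (pvBOut input_mat n i).length = 5*i := by
  induction i with
  | zero => rfl
  | succ i ih =>
      rw [pvBOut_succ, List.length_append, ih]
      simp [pvBRows]
      omega

-- A's whole i-loop
theorem pv_outLoop (input_mat : List (List Int)) (n : Nat) (i : Nat) (hin : i ≤ n) :
    (List.range i).foldl (fun om ii => (List.range n).foldl (pvCell input_mat ii) om)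
        (List.replicate (5*n) (List.replicate (5*n) (0:Int)))
      = pvBOut input_mat n i ++ List.replicate (5*(n-i)) (List.replicate (5*n) (0:Int)) := by
  induction i with
  | zero => simp [pvBOut]
  | succ i ih =>
      have hi : i < n := by omega
      rw [List.range_succ, List.foldl_append, ih (by omega), List.foldl_cons, List.foldl_nil]
      rw [pv_repl_split i n (List.replicate (5*n) (0:Int)) hi]
      have hz : ∀ k : Nat, List.replicate (5*n) (0:Int) = pvRowB (input_mat.getD i []) n 0 k := by
        intro k; simp [pvRowB, pvRowP]
      rw [show (List.replicate (5*n) (0:Int))::(List.replicate (5*n) (0:Int))::(List.replicate (5*n) (0:Int))::(List.replicate (5*n) (0:Int))::(List.replicate (5*n) (0:Int))::List.replicate (5*(n-(i+1))) (List.replicate (5*n) (0:Int))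
          = (pvRowB (input_mat.getD i []) n 0 0) :: (pvRowB (input_mat.getD i []) n 0 1) ::
            (pvRowB (input_mat.getD i []) n 0 2) :: (pvRowB (input_mat.getD i []) n 0 3) ::
            (pvRowB (input_mat.getD i []) n 0 4) :: List.replicate (5*(n-(i+1))) (List.replicate (5*n) (0:Int)) from by
        rw [← hz 0, ← hz 1, ← hz 2, ← hz 3, ← hz 4]]
      rw [pv_colLoop input_mat i n (pvBOut input_mat n i) _ (pvBOut_len input_mat n i) n le_rfl]
      rw [pvBOut_succ]
      simp [pvRowB, pvBRows, Nat.sub_self]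

-- the glyph table agrees with B's closed-form pixel formula
theorem pv_chunk_cell (v : Int) (k : Nat) (hk : k < 5) :
    (pvGlyph v).getD k [] = (List.range 5).map (fun (l : Nat) => pvCellB v (k : Int) (l : Int)) := by
  unfold pvGlyph
  by_cases h0 : v = 0
  · subst h0; interval_cases k <;> decide
  · by_cases h1 : v = 1
    · subst h1; interval_cases k <;> decide
    · by_cases hm : v = -1
      · subst hm; interval_cases k <;> decide
      · rw [if_neg h0, if_neg h1, if_neg hm,
            show List.range 5 = [0,1,2,3,4] from rfl]
        simp only [List.map_cons, List.map_nil, pvCellB, if_neg h0, if_neg h1, if_neg hm]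
        interval_cases k <;> rfl

-- A's assembled glyph row equals B's inner map
theorem pv_rowP_map (row : List Int) (k : Nat) (hk : k < 5) (m : Nat) :
    pvRowP row k m = (List.range (5*m)).map (fun c =>
      pvCellB (row.getD (c/5) 2) ((k : Nat) : Int) ((c % 5 : Nat) : Int)) := by
  induction m with
  | zero => simp [pvRowP]
  | succ m ih =>
      rw [pvRowP_succ, ih, show 5*(m+1) = 5*m + 5 by ring, List.range_add, List.map_append,
          List.map_map]
      congr 1
      unfold pvChunk
      rw [pv_chunk_cell _ k hk]
      refine List.map_congr_left (fun l hl => ?_)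
      have hl5 : l < 5 := List.mem_range.mp hl
      have hd : (5*m+l)/5 = m := by omega
      have hm5 : (5*m+l) % 5 = l := by omega
      simp only [Function.comp, hd, hm5]

-- A's assembled output equals B's map of maps
theorem pv_bout_map (input_mat : List (List Int)) (n i : Nat) :
    pvBOut input_mat n i = (List.range (5*i)).map (fun r =>
      (List.range (5*n)).map (fun c =>
        pvCellB ((input_mat.getD (r/5) []).getD (c/5) 2) ((r % 5 : Nat) : Int) ((c % 5 : Nat) : Int))) := by
  induction i with
  | zero => simp [pvBOut]
  | succ i ih =>
      rw [pvBOut_succ, ih, show 5*(i+1) = 5*i + 5 by ring, List.range_add, List.map_append,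
          List.map_map]
      congr 1
      rw [show List.range 5 = [0,1,2,3,4] from rfl]
      simp only [List.map_cons, List.map_nil, Function.comp]
      have e : ∀ k : Nat, k < 5 → (5*i+k)/5 = i ∧ (5*i+k) % 5 = k := by intro k hk; omega
      rw [(e 0 (by omega)).1, (e 0 (by omega)).2, (e 1 (by omega)).1, (e 1 (by omega)).2,
          (e 2 (by omega)).1, (e 2 (by omega)).2, (e 3 (by omega)).1, (e 3 (by omega)).2,
          (e 4 (by omega)).1, (e 4 (by omega)).2]
      simp only [pvBRows]
      rw [pv_rowP_map _ 0 (by omega), pv_rowP_map _ 1 (by omega), pv_rowP_map _ 2 (by omega),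
          pv_rowP_map _ 3 (by omega), pv_rowP_map _ 4 (by omega)]

theorem pv_main (input_mat : List (List Int)) : big_M input_mat = big_M_alt input_mat := by
  unfold big_M big_M_alt
  rw [pv_outLoop input_mat input_mat.length input_mat.length le_rfl]
  rw [pv_bout_map input_mat input_mat.length input_mat.length]
  simp [Nat.sub_self]

-- ===== VERDICT (by name: the statement is the Claim_ definition above) =====
theorem big_M_spec : Claim_equal_big_M := by
  intro input_mat _ _
  unfold Spec_big_M
  exact pv_main input_mat
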